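-- pv_equiv track=rewrite | github.com/andrewc3GH/competitive-programming | USACO-Bronze:Training-python firsthalf/USACO-notlast/main.py | calculator1
-- ===== SOURCE A (Python) =====
-- import math
--
-- def calculator1(nameLst, logDict):
--   minCowLst = []
--   numLst = []
--   num = logDict[nameLst[0]]
--   counter = 0
--   for i in range(len(logDict)):
--     numLst.append(logDict[nameLst[i]])
--     if logDict[nameLst[i]] == num:
--       counter += 1
--   if counter == len(numLst):
--     return ["Tie"]
--   minNum = math.inf
--   for j in range(len(numLst)):
--     if numLst[j] <= minNum:
--       minNum = numLst[j]
--   for i in range(len(logDict)):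
--     if logDict[nameLst[i]] == minNum:
--       minCowLst.append(nameLst[i])
--   if len(nameLst) < 7:
--     return minCowLst
--   else:
--     secondLastCowLst = []
--     oldMinNum = minNum
--     minNum = math.inf
--     for i in range(len(logDict)):
--       if logDict[nameLst[i]] <= minNum and logDict[nameLst[i]] > oldMinNum:
--         minNum = logDict[nameLst[i]]
--     for j in range(len(logDict)):
--       if logDict[nameLst[j]] == minNum:
--         secondLastCowLst.append(nameLst[j])
--     return secondLastCowLst
-- ===== SOURCE B (Python) =====
-- def calculator1(nameLst, logDict):
--     vals = [logDict[nameLst[i]] for i in range(len(logDict))]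
--     s = sorted(vals)
--     if s[0] == s[-1]:
--         return ["Tie"]
--     if len(nameLst) < 7:
--         target = s[0]
--     else:
--         target = next(v for v in s if v > s[0])
--     return [nameLst[i] for i in range(len(logDict)) if logDict[nameLst[i]] == target]
-- ===== Notes on version B (the rewrite author's own statement) =====
-- stated objective: simpler
-- what changed: A's counting pass plus three separate running-minimum/filter scans with a math.inf sentinel are replaced by building the value list once, sorting it, reading the tie/minimum/second-minimum off the sorted list's ends and first element above the minimum, and one final filter pass.
import Mathlib
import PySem

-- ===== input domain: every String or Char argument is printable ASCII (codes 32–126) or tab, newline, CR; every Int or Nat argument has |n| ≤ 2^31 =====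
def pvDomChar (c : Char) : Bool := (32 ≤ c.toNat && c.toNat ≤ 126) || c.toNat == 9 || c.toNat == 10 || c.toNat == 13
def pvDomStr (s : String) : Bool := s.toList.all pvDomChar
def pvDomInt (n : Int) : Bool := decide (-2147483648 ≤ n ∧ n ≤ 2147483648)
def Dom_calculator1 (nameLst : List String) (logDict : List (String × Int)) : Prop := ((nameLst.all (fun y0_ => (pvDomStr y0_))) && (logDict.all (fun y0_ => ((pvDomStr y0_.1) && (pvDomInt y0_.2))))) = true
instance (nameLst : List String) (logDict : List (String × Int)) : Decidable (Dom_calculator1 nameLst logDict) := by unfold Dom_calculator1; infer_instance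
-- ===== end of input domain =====

-- B replaces A's four repeated min-finding scans by one sort of the value list read at
-- its ends plus a single find/filter pass (objective: simpler).

-- ===== PORT A =====
-- A-side helpers: `nameLst[i]` / `logDict[nameLst[i]]` with a Python (possibly negative) Int
-- index; the `.getD` defaults are never reached under Pre_calculator1.
def pvKeyA (nameLst : List String) (i : Int) : String :=
  (PySem.List.pyGet? nameLst i).getD ""
def pvValA (nameLst : List String) (logDict : List (String × Int)) (i : Int) : Int :=
  (PySem.Dict.get? (PySem.Dict.mk logDict) (pvKeyA nameLst i)).getD 0
-- math.inf accumulator: `none` plays Python's math.inf, so `v <= minNum`, `v > minNum`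
-- and `v == minNum` are these three tests (int vs inf compares False for > and ==).
def pvLeInf (v : Int) (m : Option Int) : Bool := match m with | none => true | some mm => v ≤ mm
def pvGtInf (v : Int) (m : Option Int) : Bool := match m with | none => false | some mm => mm < v
def pvEqInf (v : Int) (m : Option Int) : Bool := match m with | none => false | some mm => v == mm

def calculator1 (nameLst : List String) (logDict : List (String × Int)) : List String :=
  let num := pvValA nameLst logDict 0
  let nc := (PySem.List.pyRange 0 (logDict.length : Int) 1).foldl
      (fun (s : List Int × Int) i =>
        (s.1 ++ [pvValA nameLst logDict i],
         if pvValA nameLst logDict i == num then s.2 + 1 else s.2)) ([], 0)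
  let numLst := nc.1
  let counter := nc.2
  if counter == (numLst.length : Int) then ["Tie"]
  else
    let minNum := (PySem.List.pyRange 0 (numLst.length : Int) 1).foldl
      (fun (m : Option Int) j =>
        if pvLeInf (PySem.List.pyGetD numLst j 0) m then some (PySem.List.pyGetD numLst j 0) else m) none
    let minCowLst := (PySem.List.pyRange 0 (logDict.length : Int) 1).foldl
      (fun acc i => if pvEqInf (pvValA nameLst logDict i) minNum then acc ++ [pvKeyA nameLst i] else acc) []
    if (nameLst.length : Int) < 7 then minCowLst
    else
      let oldMinNum := minNum
      let minNum2 := (PySem.List.pyRange 0 (logDict.length : Int) 1).foldl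
        (fun (m : Option Int) i =>
          if pvLeInf (pvValA nameLst logDict i) m && pvGtInf (pvValA nameLst logDict i) oldMinNum
          then some (pvValA nameLst logDict i) else m) none
      (PySem.List.pyRange 0 (logDict.length : Int) 1).foldl
        (fun acc j => if pvEqInf (pvValA nameLst logDict j) minNum2 then acc ++ [pvKeyA nameLst j] else acc) []

-- ===== PORT B =====
-- B-side helper: `logDict[nameLst[i]]` for a Nat loop index.
def pvValB (nameLst : List String) (logDict : List (String × Int)) (i : Nat) : Int :=
  (PySem.Dict.get? (PySem.Dict.mk logDict) (nameLst.getD i "")).getD 0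

def calculator1_alt (nameLst : List String) (logDict : List (String × Int)) : List String :=
  let vals := (List.range logDict.length).map (pvValB nameLst logDict)
  let s := PySem.List.sorted vals (fun x => x) false
  if PySem.List.pyGet? s 0 == PySem.List.pyGet? s (-1) then ["Tie"]
  else
    let s0 := (PySem.List.pyGet? s 0).getD 0
    let target := if (nameLst.length : Int) < 7 then s0 else (s.find? (fun v => decide (s0 < v))).getD 0
    ((List.range logDict.length).filter (fun i => pvValB nameLst logDict i == target)).map
      (fun i => nameLst.getD i "")

-- ===== PRECONDITION & SPEC =====
-- Pre_ excludes exactly the inputs where the Python A raises: an empty nameLst or empty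
-- logDict (IndexError/KeyError on logDict[nameLst[0]]), nameLst shorter than logDict
-- (IndexError in the scans), or a scanned name missing from logDict (KeyError).
def Pre_calculator1 (nameLst : List String) (logDict : List (String × Int)) : Prop :=
  nameLst ≠ [] ∧ logDict ≠ [] ∧ logDict.length ≤ nameLst.length ∧
  ∀ i < logDict.length, (PySem.Dict.get? (PySem.Dict.mk logDict) (nameLst.getD i "")).isSome
instance (nameLst : List String) (logDict : List (String × Int)) : Decidable (Pre_calculator1 nameLst logDict) := by unfold Pre_calculator1; infer_instance
def pvWitness_calculator1 : List String × (List (String × Int)) :=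
  (["a", "b", "c"], [("a", 1), ("b", 2), ("c", 1)])

def Spec_calculator1 (nameLst : List String) (logDict : List (String × Int)) (out : List String) : Prop := out = calculator1_alt nameLst logDict
instance (nameLst : List String) (logDict : List (String × Int)) (out : List String) : Decidable (Spec_calculator1 nameLst logDict out) := by unfold Spec_calculator1; infer_instance

-- ===== CLAIM (what is proved, stated in full; the proofs are below) =====
def Claim_equal_calculator1 : Prop := ∀ (nameLst : List String) (logDict : List (String × Int)), Dom_calculator1 nameLst logDict → Pre_calculator1 nameLst logDict → Spec_calculator1 nameLst logDict (calculator1 nameLst logDict)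

-- ===== LEMMAS AND PROOFS =====

lemma pvValA_cast (nameLst : List String) (logDict : List (String × Int)) (k : Nat) :
    pvValA nameLst logDict (k : Int) = pvValB nameLst logDict k := by
  simp [pvValA, pvValB, pvKeyA, List.getD_eq_getElem?_getD]

lemma pvKeyA_cast (nameLst : List String) (k : Nat) :
    pvKeyA nameLst (k : Int) = nameLst.getD k "" := by
  simp [pvKeyA, List.getD_eq_getElem?_getD]

lemma foldl_range_map {α : Type} (n : Nat) (f : Nat → Int) (g : α → Int → α) (init : α) :
    (List.range n).foldl (fun acc (k : Nat) => g acc (f k)) init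
      = ((List.range n).map f).foldl g init := List.foldl_map.symm

-- a Python for-loop over range(n) as a fold over List.range n
lemma pyRange_nat_foldl {α : Type} (n : Nat) (F : α → Int → α) (init : α) :
    (PySem.List.pyRange 0 (n : Int) 1).foldl F init
      = (List.range n).foldl (fun acc (k : Nat) => F acc (k : Int)) init := by
  rw [PySem.List.pyRange_one]
  have h0 : ((n : Int) - 0).toNat = n := by omega
  rw [h0, List.foldl_map]
  simp only [zero_add]

-- the running-min loop with a `none = math.inf` accumulator computes the fold of `min`
lemma minfold_some (l : List Int) (a : Int) :
    l.foldl (fun (m : Option Int) v => if pvLeInf v m then some v else m) (some a)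
      = some (l.foldl min a) := by
  induction l generalizing a with
  | nil => rfl
  | cons v t ih =>
    have hstep : (if pvLeInf v (some a) then some v else some a) = some (min a v) := by
      rcases le_total v a with h | h
      · simp [pvLeInf, h]
      · simp [pvLeInf, h]
        omega
    simp only [List.foldl_cons, hstep, ih]

lemma minfold_none (v : Int) (t : List Int) :
    (v :: t).foldl (fun (m : Option Int) w => if pvLeInf w m then some w else m) none
      = some (t.foldl min v) := by
  simp only [List.foldl_cons, pvLeInf, if_pos]
  exact minfold_some t v

lemma foldl_min_isMin (l : List Int) (v0 : Int) (vt : List Int) (h : l = v0 :: vt) :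
    vt.foldl min v0 ∈ l ∧ ∀ y ∈ l, vt.foldl min v0 ≤ y := by
  subst h
  refine ⟨?_, ?_⟩
  · rcases PySem.List.foldl_min_mem vt v0 with h | h
    · rw [h]; exact List.mem_cons_self ..
    · exact List.mem_cons_of_mem _ h
  · intro y hy
    rcases List.mem_cons.mp hy with h | h
    · rw [h]; exact (PySem.List.foldl_min_le vt v0).1
    · exact (PySem.List.foldl_min_le vt v0).2 y h

lemma pairwise_le_getLast {l : List Int} (h : l.Pairwise (· ≤ ·)) (hl : l ≠ []) :
    ∀ y ∈ l, y ≤ l.getLast hl := by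
  intro y hy
  obtain ⟨i, hi, rfl⟩ := List.getElem_of_mem hy
  rw [List.getLast_eq_getElem]
  rcases Nat.lt_or_ge i (l.length - 1) with h1 | h1
  · exact List.pairwise_iff_getElem.mp h i (l.length - 1) hi (by omega) h1
  · have : i = l.length - 1 := by omega
    subst this; exact le_refl _

-- ===== VERDICT (by name: the statement is the Claim_ definition above) =====
theorem calculator1_spec : Claim_equal_calculator1 := by
  intro nameLst logDict _ hpre
  obtain ⟨hn0, hd0, hlen, hkeys⟩ := hpre
  unfold Spec_calculator1 calculator1 calculator1_alt
  have hnpos : 0 < logDict.length := List.length_pos_of_ne_nil hd0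
  set n := logDict.length with hn
  set f := pvValB nameLst logDict with hf
  set vals := (List.range n).map f with hvals
  have hvlen : vals.length = n := by simp [hvals]
  have hvne : vals ≠ [] := by
    simp only [hvals, ne_eq, List.map_eq_nil_iff, List.range_eq_nil]
    omega
  have hf0mem : f 0 ∈ vals := by
    rw [hvals]; exact List.mem_map_of_mem (List.mem_range.mpr hnpos)
  have hnum : pvValA nameLst logDict 0 = f 0 := by
    simpa using pvValA_cast nameLst logDict 0
  -- A's first scan builds vals and counts occurrences of f 0
  have h1 : (PySem.List.pyRange 0 (n : Int) 1).foldl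
      (fun (s : List Int × Int) i =>
        (s.1 ++ [pvValA nameLst logDict i],
         if pvValA nameLst logDict i == pvValA nameLst logDict 0 then s.2 + 1 else s.2)) ([], 0)
      = (vals, (vals.count (f 0) : Int)) := by
    rw [pyRange_nat_foldl]
    rw [PySem.List.foldl_congr_mem _ _
      (fun (s : List Int × Int) (k : Nat) =>
        (s.1 ++ [f k], if f k == f 0 then s.2 + 1 else s.2)) _
      (by intro acc k _; simp [pvValA_cast, hnum, hf])]
    rw [foldl_range_map n f
      (fun (s : List Int × Int) v => (s.1 ++ [v], if v == f 0 then s.2 + 1 else s.2)) ([], 0)]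
    rw [PySem.List.foldl_prod_mk
      (f := fun (acc : List Int) v => acc ++ [v])
      (g := fun (acc : Int) v => if v == f 0 then acc + 1 else acc)]
    rw [PySem.List.foldl_append_singleton_eq_self, PySem.List.foldl_beq_add_one]
    simp [hvals]
  simp only [h1]
  -- sorted facts
  obtain ⟨x, t, hscons⟩ : ∃ x t, PySem.List.sorted vals (fun y => y) false = x :: t := by
    cases hsc : PySem.List.sorted vals (fun y => y) false with
    | nil => exact absurd ((PySem.List.sorted_eq_nil_iff vals _ false).mp hsc) hvne
    | cons a b => exact ⟨a, b, rfl⟩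
  have hxmem : x ∈ vals := (PySem.List.mem_sorted vals _ false x).mp (hscons ▸ List.mem_cons_self ..)
  have hxmin : ∀ y ∈ vals, x ≤ y := PySem.List.key_head_sorted_le vals (fun y => y) hscons
  have hperm : (x :: t).Perm vals := hscons ▸ PySem.List.sorted_perm vals (fun y => y) false
  have hpw : (x :: t).Pairwise (fun a b : Int => a ≤ b) := by
    have := PySem.List.sorted_pairwise vals (fun y : Int => y)
    rw [hscons] at this; exact this
  have hLmem : (x :: t).getLast (by simp) ∈ vals := hperm.subset (List.getLast_mem _)
  have hall_iff : (∀ y ∈ vals, f 0 = y) ↔ x = (x :: t).getLast (by simp) := by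
    constructor
    · intro hall
      have ha : f 0 = x := hall x hxmem
      have hb : f 0 = (x :: t).getLast (by simp) := hall _ hLmem
      omega
    · intro hxl y hy
      have h1 : x ≤ y := hxmin y hy
      have h2 : y ≤ (x :: t).getLast (by simp) :=
        pairwise_le_getLast hpw (by simp) y (hperm.mem_iff.mpr hy)
      have h3 : x ≤ f 0 := hxmin _ hf0mem
      have h4 : f 0 ≤ (x :: t).getLast (by simp) :=
        pairwise_le_getLast hpw (by simp) _ (hperm.mem_iff.mpr hf0mem)
      omega
  rw [hscons]
  simp only [PySem.List.pyGet?_zero_cons, PySem.List.pyGet?_neg_one,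
    List.getLast?_eq_some_getLast (l := x :: t) (by simp), Option.getD_some]
  by_cases hall : ∀ y ∈ vals, f 0 = y
  · have hA : ((vals.count (f 0) : Int) == (vals.length : Int)) = true := by
      rw [beq_iff_eq]
      exact_mod_cast List.count_eq_length.mpr hall
    have hB : (some x == some ((x :: t).getLast (by simp))) = true := by
      simp only [beq_iff_eq, Option.some.injEq]
      exact hall_iff.mp hall
    simp [hA, hB]
  · have hA : ((vals.count (f 0) : Int) == (vals.length : Int)) = false := by
      rw [beq_eq_false_iff_ne]
      intro hcc
      exact hall (List.count_eq_length.mp (by exact_mod_cast hcc))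
    have hB : (some x == some ((x :: t).getLast (by simp))) = false := by
      rw [beq_eq_false_iff_ne]
      simp only [ne_eq, Option.some.injEq]
      exact fun hxL => hall (hall_iff.mpr hxL)
    simp only [hA, hB, Bool.false_eq_true, if_false]
    -- the running minimum of A is x
    have hminA : (PySem.List.pyRange 0 (vals.length : Int)).foldl
        (fun (m : Option Int) j => if pvLeInf (PySem.List.pyGetD vals j 0) m
          then some (PySem.List.pyGetD vals j 0) else m) none = some x := by
      rw [PySem.List.foldl_pyRange_zero_pyGetD' vals 0
        (fun (m : Option Int) v => if pvLeInf v m then some v else m) none]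
      obtain ⟨v0, vt, hvcons⟩ := List.exists_cons_of_ne_nil hvne
      rw [hvcons, minfold_none]
      have hm := foldl_min_isMin vals v0 vt hvcons
      exact congrArg some (le_antisymm (hm.2 x hxmem) (hxmin _ hm.1))
    -- both filter passes collect the names whose value is the target
    have hfilt : ∀ (m2 : Int), (PySem.List.pyRange 0 (n : Int) 1).foldl
        (fun acc i => if pvEqInf (pvValA nameLst logDict i) (some m2)
          then acc ++ [pvKeyA nameLst i] else acc) []
        = ((List.range n).filter (fun i => f i == m2)).map (fun i => nameLst.getD i "") := by
      intro m2
      rw [pyRange_nat_foldl]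
      rw [PySem.List.foldl_congr_mem _ _
        (fun (acc : List String) (k : Nat) =>
          if f k == m2 then acc ++ [nameLst.getD k ""] else acc) _
        (by intro acc k _; simp [pvValA_cast, pvKeyA_cast, pvEqInf, hf])]
      rw [PySem.List.foldl_append_if (fun k => f k == m2) (fun k => nameLst.getD k "")]
      simp
    simp only [hminA, hfilt]
    by_cases h7 : (nameLst.length : Int) < 7
    · simp [h7]
    · simp only [h7, if_false]
      -- the second pass: minimum of the values strictly above x
      have hex : ∃ y ∈ vals, x < y := by
        by_contra hno
        push Not at hno
        apply hall
        intro y hy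
        have h1 : x ≤ y := hxmin y hy
        have h2 : y ≤ x := hno y hy
        have h3 : x ≤ f 0 := hxmin _ hf0mem
        have h4 : f 0 ≤ x := hno _ hf0mem
        omega
      set w := vals.filter (fun v => decide (x < v)) with hw
      have hwne : w ≠ [] := by
        obtain ⟨y, hy, hxy⟩ := hex
        intro hwnil
        have : y ∈ w := List.mem_filter.mpr ⟨hy, by simpa using hxy⟩
        rw [hwnil] at this
        exact absurd this (List.not_mem_nil)
      obtain ⟨w0, wt, hwcons⟩ := List.exists_cons_of_ne_nil hwne
      have hm2 := foldl_min_isMin w w0 wt hwcons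
      have hminA2 : (PySem.List.pyRange 0 (n : Int) 1).foldl
          (fun (m : Option Int) i =>
            if pvLeInf (pvValA nameLst logDict i) m && pvGtInf (pvValA nameLst logDict i) (some x)
            then some (pvValA nameLst logDict i) else m) none = some (wt.foldl min w0) := by
        rw [pyRange_nat_foldl]
        rw [PySem.List.foldl_congr_mem _ _
          (fun (m : Option Int) (k : Nat) =>
            if decide (x < f k) then (if pvLeInf (f k) m then some (f k) else m) else m) _
          (by
            intro acc k _
            simp only [pvValA_cast, hf]
            by_cases hx : x < pvValB nameLst logDict k
            · simp [pvGtInf, hx]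
            · simp [pvGtInf, hx])]
        rw [foldl_range_map n f
          (fun (m : Option Int) v =>
            if decide (x < v) then (if pvLeInf v m then some v else m) else m) none]
        rw [PySem.List.foldl_if_eq_foldl_filter (fun v => decide (x < v))
          (fun (m : Option Int) v => if pvLeInf v m then some v else m) vals none]
        rw [← hw, hwcons, minfold_none]
      have hfind : List.find? (fun v => decide (x < v)) (x :: t) = some (wt.foldl min w0) := by
        rw [← List.head?_filter]
        have hpermf : ((x :: t).filter (fun v => decide (x < v))).Perm w := hperm.filter _
        obtain ⟨u0, ut, hucons⟩ : ∃ u0 ut, (x :: t).filter (fun v => decide (x < v)) = u0 :: ut := by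
          cases hfc : (x :: t).filter (fun v => decide (x < v)) with
          | nil =>
            rw [hfc] at hpermf
            exact absurd hpermf.symm.eq_nil hwne
          | cons a b => exact ⟨a, b, rfl⟩
        rw [hucons]
        rw [hucons] at hpermf
        have hu0w : u0 ∈ w := hpermf.subset (List.mem_cons_self ..)
        have hu0lb : ∀ y ∈ w, u0 ≤ y := by
          intro y hy
          rcases List.mem_cons.mp (hpermf.mem_iff.mpr hy) with rfl | h
          · exact le_refl _
          · exact List.rel_of_pairwise_cons (hucons ▸ (hpw.filter _)) h
        simp [le_antisymm (hu0lb _ hm2.1) (hm2.2 u0 hu0w)]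
      simp only [hminA2, hfind, hfilt, Option.getD_some]
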